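-- pv_equiv track=rewrite | github.com/HUFS-ICE-STUDY/Algorithm | Week/Week11/BOJ8911_jang.py | answer
-- ===== SOURCE A (Python) =====
-- def answer(s):
--     x,y = 499,499
--     state = 0   # 0: 위, 1: 오른쪽, 2: 아래, 3: 왼쪽
--     dic = { 0:(0,-1), 1:(1,0), 2:(0,1), 3:(-1,0) }
--     l,r,u,d = 499,499,499,499
--     for item in s:
--         if item == 'F':
--             tx,ty = dic[state]
--             x += tx
--             y += ty
--         elif item == 'B':
--             tx,ty = dic[state]
--             x -= tx
--             y -= ty
--         elif item == 'L':
--             state = (state+4-1)%4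
--         elif item == 'R':
--             state = (state+4+1)%4
--
--         # 갱신
--         if x>r: r = x
--         if x<l: l = x
--         if y>d: d = y
--         if y<u: u = y
--
--     return (r-l)*(d-u)
-- ===== SOURCE B (Python) =====
-- def answer(s):
--     DIRS = [(0, -1), (1, 0), (0, 1), (-1, 0)]
--     def trace(x, y, state, cmds):
--         pts = []
--         for c in cmds:
--             if c == 'F':
--                 x += DIRS[state][0]
--                 y += DIRS[state][1]
--             elif c == 'B':
--                 x -= DIRS[state][0]
--                 y -= DIRS[state][1]
--             elif c == 'L':
--                 state = (state + 3) % 4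
--             elif c == 'R':
--                 state = (state + 1) % 4
--             pts.append((x, y))
--         return pts
--     pts = trace(499, 499, 0, s)
--     xs = [499] + [p[0] for p in pts]
--     ys = [499] + [p[1] for p in pts]
--     return (max(xs) - min(xs)) * (max(ys) - min(ys))
-- ===== Notes on version B (the rewrite author's own statement) =====
-- stated objective: alternative
-- what changed: B separates simulation from measurement: it records the visited positions as a list (seeded with the start point) and computes the bounding box with max/min passes afterwards, instead of A's inline l/r/u/d running extrema inside the command loop; the direction dict becomes an indexed vector table.
import Mathlib
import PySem

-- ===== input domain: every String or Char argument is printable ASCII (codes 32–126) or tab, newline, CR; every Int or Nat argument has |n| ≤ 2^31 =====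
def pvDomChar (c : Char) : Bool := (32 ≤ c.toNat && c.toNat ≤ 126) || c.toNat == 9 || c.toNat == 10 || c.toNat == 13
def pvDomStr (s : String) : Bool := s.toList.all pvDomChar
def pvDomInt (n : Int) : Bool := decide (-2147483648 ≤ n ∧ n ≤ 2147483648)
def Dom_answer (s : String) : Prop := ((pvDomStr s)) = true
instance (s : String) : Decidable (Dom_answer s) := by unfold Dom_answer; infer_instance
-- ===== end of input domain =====

-- B records the visited positions as a list and measures the bounding box afterwards with
-- max/min, instead of A's inline running extrema; same values, same O(n) cost.

-- ===== PORT A =====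
-- dic[state]: state is always 0..3, so the dict lookup never raises; getD's default is unreachable.
def answerDic : PySem.Dict Int (Int × Int) :=
  PySem.Dict.ofList [(0, (0, -1)), (1, (1, 0)), (2, (0, 1)), (3, (-1, 0))]

def answerStep (acc : Int × Int × Int × Int × Int × Int × Int) (item : Char) :
    Int × Int × Int × Int × Int × Int × Int :=
  let (x, y, state, l, r, u, d) := acc
  let (x, y, state) :=
    if item = 'F' then
      let t := (PySem.Dict.get? answerDic state).getD (0, 0)
      (x + t.1, y + t.2, state)
    else if item = 'B' then
      let t := (PySem.Dict.get? answerDic state).getD (0, 0)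
      (x - t.1, y - t.2, state)
    else if item = 'L' then (x, y, PySem.Int.mod (state + 4 - 1) 4)
    else if item = 'R' then (x, y, PySem.Int.mod (state + 4 + 1) 4)
    else (x, y, state)
  let r := if x > r then x else r
  let l := if x < l then x else l
  let d := if y > d then y else d
  let u := if y < u then y else u
  (x, y, state, l, r, u, d)

def answer (s : String) : Int :=
  let st := s.toList.foldl answerStep (499, 499, 0, 499, 499, 499, 499)
  let (_, _, _, l, r, u, d) := st
  (r - l) * (d - u)

-- ===== PORT B =====
def answerDirs : List (Int × Int) := [(0, -1), (1, 0), (0, 1), (-1, 0)]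

-- DIRS[state]: state is always 0..3, so the indexing never raises; getD's default is unreachable.
def answerTrace : Int → Int → Int → List Char → List (Int × Int)
  | _, _, _, [] => []
  | x, y, state, c :: cs =>
    if c = 'F' then
      let t := (PySem.List.pyGet? answerDirs state).getD (0, 0)
      (x + t.1, y + t.2) :: answerTrace (x + t.1) (y + t.2) state cs
    else if c = 'B' then
      let t := (PySem.List.pyGet? answerDirs state).getD (0, 0)
      (x - t.1, y - t.2) :: answerTrace (x - t.1) (y - t.2) state cs
    else if c = 'L' then (x, y) :: answerTrace x y (PySem.Int.mod (state + 3) 4) cs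
    else if c = 'R' then (x, y) :: answerTrace x y (PySem.Int.mod (state + 1) 4) cs
    else (x, y) :: answerTrace x y state cs

def answer_alt (s : String) : Int :=
  let pts := answerTrace 499 499 0 s.toList
  let xs : List Int := 499 :: pts.map Prod.fst
  let ys : List Int := 499 :: pts.map Prod.snd
  ((PySem.List.max? xs (fun v => v)).getD 0 - (PySem.List.min? xs (fun v => v)).getD 0) *
  ((PySem.List.max? ys (fun v => v)).getD 0 - (PySem.List.min? ys (fun v => v)).getD 0)

-- ===== PRECONDITION & SPEC =====
def Spec_answer (s : String) (out : Int) : Prop := out = answer_alt s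
instance (s : String) (out : Int) : Decidable (Spec_answer s out) := by unfold Spec_answer; infer_instance

-- ===== CLAIM (what is proved, stated in full; the proofs are below) =====
def Claim_equal_answer : Prop := ∀ (s : String), Dom_answer s → Spec_answer s (answer s)

-- ===== LEMMAS AND PROOFS =====

-- loop invariant: A's running extrema are fold-min/max over B's trace
theorem if_gt_eq_max (a b : Int) : (if b > a then b else a) = max a b := by
  rw [max_def]; split_ifs <;> omega

theorem if_lt_eq_min (a b : Int) : (if b < a then b else a) = min a b := by
  rw [min_def]; split_ifs <;> omega

theorem answer_lookup_eq (state : Int) (h0 : 0 ≤ state) (h4 : state < 4) :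
    (PySem.Dict.get? answerDic state).getD (0, 0) =
      (PySem.List.pyGet? answerDirs state).getD (0, 0) := by
  interval_cases state <;> decide

theorem answer_inv (cs : List Char) :
    ∀ x y state l r u d, 0 ≤ state → state < 4 →
    (cs.foldl answerStep (x, y, state, l, r, u, d)).2.2.2 =
      (((answerTrace x y state cs).map Prod.fst).foldl min l,
       ((answerTrace x y state cs).map Prod.fst).foldl max r,
       ((answerTrace x y state cs).map Prod.snd).foldl min u,
       ((answerTrace x y state cs).map Prod.snd).foldl max d) := by
  induction cs with
  | nil => intro x y state l r u d h0 h4; simp [answerTrace]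
  | cons c cs ih =>
    intro x y state l r u d h0 h4
    have hmod3 : 0 ≤ PySem.Int.mod (state + 3) 4 ∧ PySem.Int.mod (state + 3) 4 < 4 := by
      rw [PySem.Int.mod_eq_emod_of_pos (by norm_num : (0:Int) < 4)]; omega
    have hmod1 : 0 ≤ PySem.Int.mod (state + 1) 4 ∧ PySem.Int.mod (state + 1) 4 < 4 := by
      rw [PySem.Int.mod_eq_emod_of_pos (by norm_num : (0:Int) < 4)]; omega
    simp only [List.foldl_cons, answerStep, answerTrace, if_gt_eq_max, if_lt_eq_min]
    by_cases hF : c = 'F'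
    · simp only [hF, reduceIte]
      rw [answer_lookup_eq state h0 h4, ih _ _ _ _ _ _ _ h0 h4]
      simp only [List.map_cons, List.foldl_cons]
    · by_cases hB : c = 'B'
      · simp only [hB, Char.reduceEq, reduceIte]
        rw [answer_lookup_eq state h0 h4, ih _ _ _ _ _ _ _ h0 h4]
        simp only [List.map_cons, List.foldl_cons]
      · by_cases hL : c = 'L'
        · have he : state + 4 - 1 = state + 3 := by ring
          simp only [hL, Char.reduceEq, reduceIte, he]
          rw [ih _ _ _ _ _ _ _ hmod3.1 hmod3.2]
          simp only [List.map_cons, List.foldl_cons]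
        · by_cases hR : c = 'R'
          · have he : state + 4 + 1 = state + 1 + 4 := by ring
            have hm : PySem.Int.mod (state + 4 + 1) 4 = PySem.Int.mod (state + 1) 4 := by
              rw [he, PySem.Int.mod_eq_emod_of_pos (by norm_num : (0:Int) < 4),
                  PySem.Int.mod_eq_emod_of_pos (by norm_num : (0:Int) < 4)]
              omega
            simp only [hR, Char.reduceEq, reduceIte, hm]
            rw [ih _ _ _ _ _ _ _ hmod1.1 hmod1.2]
            simp only [List.map_cons, List.foldl_cons]
          · simp only [hF, hB, hL, hR, reduceIte]
            rw [ih _ _ _ _ _ _ _ h0 h4]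
            simp only [List.map_cons, List.foldl_cons]

-- ===== VERDICT (by name: the statement is the Claim_ definition above) =====
theorem answer_spec : Claim_equal_answer := by
  intro s _
  unfold Spec_answer answer answer_alt
  have h := answer_inv s.toList 499 499 0 499 499 499 499 (by norm_num) (by norm_num)
  simp only [PySem.List.max?_id_cons, PySem.List.min?_id_cons, Option.getD_some]
  rcases hfold : s.toList.foldl answerStep (499, 499, 0, 499, 499, 499, 499) with
    ⟨x, y, state, l, r, u, d⟩
  rw [hfold] at h
  simp only [Prod.mk.injEq] at h
  obtain ⟨hl, hr, hu, hd⟩ := h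
  rw [hl, hr, hu, hd]
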